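-- pv_equiv track=rewrite | github.com/grunet01/CS460 | src/projects/knapsack/knapsack_cipher.py | calculate_m
-- ===== SOURCE A (Python) =====
-- def calculate_m(n: int) -> int:
--     """
--     Calculate M value
--
--     M is the largest number in the range [1, N) that is co-prime of N
--     :param n: N value
--     """
--     def gcd(a, b):
--         # euclidean algorithm for coprime
--         while b > 0:
--             a, b = b, a % b
--         return a
--
--     for k in range(n - 1, 0, -1):
--         if gcd(n, k) == 1:
--             return k
--
--     return None
-- ===== SOURCE B (Python) =====
-- def calculate_m(n: int) -> int:
--     # n and n-1 are always coprime, so the largest coprime below n is n-1 (if the range is nonempty).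
--     return n - 1 if n >= 2 else None
-- ===== Notes on version B (the rewrite author's own statement) =====
-- stated objective: simpler
-- what changed: Replaces the gcd helper and the descending scan with the closed form n-1, since n and n-1 are always coprime.
import Mathlib
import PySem

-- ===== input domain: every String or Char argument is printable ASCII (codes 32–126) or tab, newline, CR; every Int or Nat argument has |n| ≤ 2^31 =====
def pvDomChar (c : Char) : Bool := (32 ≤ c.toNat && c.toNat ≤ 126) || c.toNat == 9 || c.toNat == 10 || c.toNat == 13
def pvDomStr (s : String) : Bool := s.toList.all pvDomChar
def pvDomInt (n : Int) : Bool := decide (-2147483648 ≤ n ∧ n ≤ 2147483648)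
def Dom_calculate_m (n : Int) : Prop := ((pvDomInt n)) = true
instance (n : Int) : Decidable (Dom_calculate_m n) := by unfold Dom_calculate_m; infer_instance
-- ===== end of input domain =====

-- B replaces A's descending gcd-scan with the closed form n-1 (n and n-1 are coprime) — a closed form instead of the gcd scan.

-- ===== PORT A =====
-- inner helper gcd: euclidean loop 'while b > 0: a, b = b, a % b; return a'
def pvGcdA (a b : Int) : Int :=
  if h : b > 0 then pvGcdA b (PySem.Int.mod a b) else a
termination_by b.toNat
decreasing_by
  have h0 : 0 ≤ PySem.Int.mod a b := Int.fmod_nonneg_of_pos a h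
  have h1 : PySem.Int.mod a b < b := Int.fmod_lt_of_pos a h
  omega

-- 'for k in range(n-1, 0, -1): if gcd(n, k) == 1: return k' then 'return None'
-- (the descending range is iterated lazily, as Python's range is: k runs n-1, n-2, … while k > 0)
def pvLoopA (n k : Int) : Option Int :=
  if k > 0 then
    (if pvGcdA n k == 1 then some k else pvLoopA n (k - 1))
  else none
termination_by k.toNat
decreasing_by omega

def calculate_m (n : Int) : Option Int := pvLoopA n (n - 1)

-- ===== PORT B =====
def calculate_m_alt (n : Int) : Option Int :=
  if n ≥ 2 then some (n - 1) else none

-- ===== PRECONDITION & SPEC =====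
def Spec_calculate_m (n : Int) (out : Option Int) : Prop := out = calculate_m_alt n
instance (n : Int) (out : Option Int) : Decidable (Spec_calculate_m n out) := by unfold Spec_calculate_m; infer_instance

-- ===== CLAIM (what is proved, stated in full; the proofs are below) =====
def Claim_equal_calculate_m : Prop := ∀ (n : Int), Dom_calculate_m n → Spec_calculate_m n (calculate_m n)

-- ===== LEMMAS AND PROOFS =====

lemma pvGcdA_one (a : Int) : pvGcdA a 1 = 1 := by
  rw [pvGcdA]
  simp only [show (1:Int) > 0 from by omega, dite_true]
  rw [show PySem.Int.mod a 1 = 0 from Int.fmod_one a]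
  rw [pvGcdA]; simp

lemma pvGcdA_pred (n : Int) (h : 2 ≤ n) : pvGcdA n (n - 1) = 1 := by
  rcases eq_or_lt_of_le h with h2 | h3
  · rw [← h2]; norm_num [pvGcdA_one]
  · rw [pvGcdA]
    simp only [show n - 1 > 0 from by omega, dite_true]
    have hm : PySem.Int.mod n (n - 1) = 1 := by
      have hb : (0:Int) < n - 1 := by omega
      rw [PySem.Int.mod, Int.fmod_eq_emod_of_nonneg n (by omega)]
      nth_rewrite 1 [show n = 1 + (n - 1) * 1 from by ring]
      rw [Int.add_mul_emod_self_left]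
      exact Int.emod_eq_of_lt (by omega) (by omega)
    rw [hm]; exact pvGcdA_one (n - 1)

lemma calculate_m_eq (n : Int) : calculate_m n = calculate_m_alt n := by
  by_cases h : 2 ≤ n
  · rw [calculate_m, pvLoopA]
    rw [if_pos (by omega : n - 1 > 0)]
    rw [show (pvGcdA n (n-1) == 1) = true from by rw [pvGcdA_pred n h]; rfl]
    simp [calculate_m_alt, h]
  · rw [calculate_m, pvLoopA]
    rw [if_neg (by omega : ¬ n - 1 > 0)]
    simp [calculate_m_alt, h]

-- ===== VERDICT (by name: the statement is the Claim_ definition above) =====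
theorem calculate_m_spec : Claim_equal_calculate_m := by
  intro n _
  unfold Spec_calculate_m
  exact calculate_m_eq n
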